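-- pv_equiv track=rewrite | github.com/vffuunnyy/notcoin_botnet | tests/some_boosters_calcucations/main.py | sum_balances_per_day
-- ===== SOURCE A (Python) =====
-- def sum_balances_per_day(data):
--     day_balances = {}
--     for day, balance in data:
--         if day in day_balances:
--             day_balances[day] = max(day_balances[day], balance)
--         else:
--             day_balances[day] = balance
--     return day_balances
-- ===== SOURCE B (Python) =====
-- def sum_balances_per_day(data):
--     groups = {}
--     for day, balance in data:
--         groups.setdefault(day, []).append(balance)
--     return {day: max(balances) for day, balances in groups.items()}
-- ===== Notes on version B (the rewrite author's own statement) =====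
-- stated objective: alternative
-- what changed: Replaces A's single running-max-per-key scan with a group-then-reduce shape: a first pass collects each day's balances into a list, a second pass takes max of each group.
import Mathlib
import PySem

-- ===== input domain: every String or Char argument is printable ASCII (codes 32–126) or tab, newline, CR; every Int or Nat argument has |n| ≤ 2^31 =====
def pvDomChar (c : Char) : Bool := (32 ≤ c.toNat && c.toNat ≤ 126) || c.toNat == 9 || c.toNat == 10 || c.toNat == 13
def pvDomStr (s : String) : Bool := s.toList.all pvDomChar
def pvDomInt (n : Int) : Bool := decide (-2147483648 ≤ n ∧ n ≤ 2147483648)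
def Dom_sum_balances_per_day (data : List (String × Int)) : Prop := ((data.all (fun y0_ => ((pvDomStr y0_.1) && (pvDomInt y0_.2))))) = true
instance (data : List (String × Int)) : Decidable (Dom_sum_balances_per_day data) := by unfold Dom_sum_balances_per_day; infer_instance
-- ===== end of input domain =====

-- B replaces A's running-max-per-key scan by a group-into-lists pass followed by a max-per-group pass (alternative decomposition, same cost).


-- ===== PORT A =====
-- literal port of A: a dict holding the running max per day; 'day in day_balances' is contains,
-- 'day_balances[day]' on a contained key is getD _ 0 (exact: the key is present).
def sum_balances_per_day (data : List (String × Int)) : List (String × Int) :=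
  (data.foldl
    (fun d p =>
      if d.contains p.1 then d.insert p.1 (max (d.getD p.1 0) p.2)
      else d.insert p.1 p.2)
    (PySem.Dict.empty : PySem.Dict String Int)).items

-- ===== PORT B =====
-- Python's max() on a list of ints; applied only to the nonempty group lists.
def pyMaxInt (l : List Int) : Int :=
  match l with
  | [] => 0
  | x :: xs => xs.foldl max x

-- literal port of B: 'groups.setdefault(day, []).append(balance)' is exactly
-- groups[day] = groups.get(day, []) + [balance], i.e. Dict.modify; then a map over items.
def sum_balances_per_day_alt (data : List (String × Int)) : List (String × Int) :=
  ((data.foldl (fun g p => g.modify p.1 [] (· ++ [p.2]))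
      (PySem.Dict.empty : PySem.Dict String (List Int))).items).map
    (fun q => (q.1, pyMaxInt q.2))

-- ===== PRECONDITION & SPEC =====
def Spec_sum_balances_per_day (data : List (String × Int)) (out : List (String × Int)) : Prop := out = sum_balances_per_day_alt data
instance (data : List (String × Int)) (out : List (String × Int)) : Decidable (Spec_sum_balances_per_day data out) := by unfold Spec_sum_balances_per_day; infer_instance

-- ===== CLAIM (what is proved, stated in full; the proofs are below) =====
def Claim_equal_sum_balances_per_day : Prop := ∀ (data : List (String × Int)), Dom_sum_balances_per_day data → Spec_sum_balances_per_day data (sum_balances_per_day data)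

-- ===== LEMMAS AND PROOFS =====

def stepA (d : PySem.Dict String Int) (p : String × Int) : PySem.Dict String Int :=
  d.insert p.1 (if d.contains p.1 then max (d.getD p.1 0) p.2 else p.2)

lemma stepA_eq :
    (fun (d : PySem.Dict String Int) (p : String × Int) =>
      if d.contains p.1 then d.insert p.1 (max (d.getD p.1 0) p.2)
      else d.insert p.1 p.2) = stepA := by
  funext d p
  unfold stepA
  by_cases h : d.contains p.1 <;> simp [h]

def combineMax (o : Option Int) (b : Int) : Option Int :=
  some (match o with | none => b | some v => max v b)

lemma foldl_combineMax (xs : List Int) (x : Int) :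
    xs.foldl combineMax (some x) = some (xs.foldl max x) := by
  induction xs generalizing x with
  | nil => rfl
  | cons y ys ih => simpa [combineMax] using ih (max x y)

lemma stepA_get? (d : PySem.Dict String Int) (p : String × Int) (k : String) :
    (stepA d p).get? k =
      if p.1 = k then combineMax (d.get? k) p.2 else d.get? k := by
  unfold stepA
  by_cases hk : p.1 = k
  · subst hk
    rw [if_pos rfl, PySem.Dict.get?_insert_self]
    cases h : d.get? p.1 with
    | none =>
        have hc : d.contains p.1 = false := by
          rw [PySem.Dict.contains_eq_isSome_get?, h]; rfl
        simp [hc, combineMax]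
    | some v =>
        have hc : d.contains p.1 = true := by
          rw [PySem.Dict.contains_eq_isSome_get?, h]; rfl
        have hd : d.getD p.1 0 = v := PySem.Dict.getD_of_get?_eq_some d 0 h
        simp [hc, hd, combineMax]
  · rw [if_neg hk, PySem.Dict.get?_insert_of_ne d _ (Ne.symm hk)]

lemma foldA_get? (data : List (String × Int)) (d : PySem.Dict String Int) (k : String) :
    (data.foldl stepA d).get? k =
      ((data.filter (fun p => p.1 == k)).map (·.2)).foldl combineMax (d.get? k) := by
  induction data generalizing d with
  | nil => rfl
  | cons p ps ih =>
      by_cases hk : p.1 = k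
      · simp [List.foldl_cons, ih, hk, stepA_get? d p k]
      · simp [List.foldl_cons, ih, hk, stepA_get? d p k]

theorem sum_balances_per_day_spec_aux (data : List (String × Int)) :
    sum_balances_per_day data = sum_balances_per_day_alt data := by
  unfold sum_balances_per_day sum_balances_per_day_alt
  rw [stepA_eq]
  set A := data.foldl stepA (PySem.Dict.empty : PySem.Dict String Int) with hA
  set G := data.foldl (fun g p => g.modify p.1 [] (· ++ [p.2]))
      (PySem.Dict.empty : PySem.Dict String (List Int)) with hG
  have hAkeys : A.keys = PySem.Set.ofList (data.map (fun p => p.1)) := by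
    rw [hA]
    have := PySem.Dict.keys_foldl_insert_key (l := data) (key := fun p => p.1)
      (f := fun d p => if d.contains p.1 then max (d.getD p.1 0) p.2 else p.2)
      (d := (PySem.Dict.empty : PySem.Dict String Int))
    simpa [stepA, PySem.Set.update_empty] using this
  have hGkeys : G.keys = PySem.Set.ofList (data.map (fun p => p.1)) := by
    rw [hG]
    have := PySem.Dict.keys_foldl_modify_key (l := data) (key := fun p => p.1)
      (d0 := ([] : List Int)) (f := fun g p v => v ++ [p.2])
      (d := (PySem.Dict.empty : PySem.Dict String (List Int)))
    simpa [PySem.Set.update_empty] using this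
  have hAnd : A.keys.Nodup := by
    rw [hAkeys]; exact PySem.Set.nodup_ofList _
  have hGnd : G.keys.Nodup := by
    rw [hGkeys]; exact PySem.Set.nodup_ofList _
  have hGget : ∀ k, G.getD k [] = (data.filter (fun p => p.1 == k)).map (·.2) := by
    intro k
    rw [hG, PySem.Dict.getD_foldl_modify_append]
    simp
  rw [PySem.Dict.items_eq_map_keys A hAnd 0, PySem.Dict.items_eq_map_keys G hGnd []]
  rw [List.map_map, hAkeys, hGkeys]
  apply List.map_congr_left
  intro k hk
  have hkmem : k ∈ data.map (fun p => p.1) := (PySem.Set.mem_ofList _ _).1 hk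
  have hne : (data.filter (fun p => p.1 == k)).map (·.2) ≠ [] := by
    obtain ⟨p, hp, hpk⟩ := List.mem_map.1 hkmem
    have hmem : p.2 ∈ (data.filter (fun p => p.1 == k)).map (·.2) :=
      List.mem_map.2 ⟨p, List.mem_filter.2 ⟨hp, by simp [hpk]⟩, rfl⟩
    intro hc
    rw [hc] at hmem
    exact (List.not_mem_nil).elim hmem
  have hAget : A.getD k 0 = pyMaxInt ((data.filter (fun p => p.1 == k)).map (·.2)) := by
    cases hcase : (data.filter (fun p => p.1 == k)).map (·.2) with
    | nil => exact absurd hcase hne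
    | cons x xs =>
        have h1 : A.get? k = some (xs.foldl max x) := by
          rw [hA, foldA_get? data _ k, hcase, PySem.Dict.get?_empty, List.foldl_cons]
          have : combineMax none x = some x := rfl
          rw [this, foldl_combineMax]
        rw [PySem.Dict.getD_of_get?_eq_some A 0 h1, pyMaxInt]
  simp only [Function.comp, hGget k, hAget]

-- ===== VERDICT (by name: the statement is the Claim_ definition above) =====
theorem sum_balances_per_day_spec : Claim_equal_sum_balances_per_day := by
  intro data _
  exact sum_balances_per_day_spec_aux data
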